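-- pv_equiv track=rewrite | github.com/Mosder/agh | sem3/agrafka/proj2/example.py | input_data_to_matrix
-- ===== SOURCE A (Python) =====
-- def is_in_bounds(width, height, position):
--     if 0 <= position[0] < height and 0 <= position[1] < width:
--         return True
--     return False
--
-- def input_data_to_matrix(width, height, holes, pieces):
--     matrix = [[None for _ in range(width)] for _ in range(height)]
--
--     for col, row in holes:
--         if is_in_bounds(width, height, (row-1, col-1)): # check, because some holes are outside of the board
--             matrix[row-1][col-1] = "hole"
--
--     for piece, col, row in pieces:
--         if is_in_bounds(width, height, (row-1, col-1)): # again, some pieces are outside of the board for some reason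
--             matrix[row-1][col-1] = piece
--
--     return matrix
-- ===== SOURCE B (Python) =====
-- def input_data_to_matrix(width, height, holes, pieces):
--     def cell(r, c):
--         for piece, col, row in reversed(pieces):
--             if row - 1 == r and col - 1 == c:
--                 return piece
--         for col, row in holes:
--             if row - 1 == r and col - 1 == c:
--                 return "hole"
--         return None
--     return [[cell(r, c) for c in range(width)] for r in range(height)]
-- ===== Notes on version B (the rewrite author's own statement) =====
-- stated objective: alternative
-- what changed: B computes each cell's value directly by a nested comprehension over the board: for cell (r,c) it reverse-scans pieces for the last piece at that cell, then scans holes, with no matrix mutation and no bounds checks (cells are in bounds by construction), instead of A's allocate-then-overwrite passes.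
import Mathlib
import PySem

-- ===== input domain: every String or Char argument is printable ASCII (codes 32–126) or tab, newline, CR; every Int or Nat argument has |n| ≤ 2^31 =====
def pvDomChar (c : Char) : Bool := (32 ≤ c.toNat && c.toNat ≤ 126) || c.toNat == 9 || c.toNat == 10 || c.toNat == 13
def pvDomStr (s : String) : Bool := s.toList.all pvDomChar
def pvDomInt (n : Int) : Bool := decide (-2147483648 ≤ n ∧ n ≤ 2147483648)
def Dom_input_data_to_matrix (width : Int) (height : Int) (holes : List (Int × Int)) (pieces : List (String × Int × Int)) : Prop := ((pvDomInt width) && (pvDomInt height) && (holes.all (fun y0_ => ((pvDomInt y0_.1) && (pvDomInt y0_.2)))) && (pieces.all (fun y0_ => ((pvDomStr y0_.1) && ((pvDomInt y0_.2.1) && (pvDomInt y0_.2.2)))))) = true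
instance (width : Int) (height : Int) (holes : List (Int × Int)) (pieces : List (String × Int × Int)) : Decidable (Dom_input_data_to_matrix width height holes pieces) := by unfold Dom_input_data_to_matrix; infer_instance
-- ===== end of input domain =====

-- B replaces A's allocate-then-overwrite matrix passes with a direct per-cell computation (reverse scan of pieces, then holes); alternative decomposition, same results.
-- ===== PORT A =====
def is_in_bounds (width : Int) (height : Int) (position : Int × Int) : Bool :=
  if 0 ≤ position.1 ∧ position.1 < height ∧ 0 ≤ position.2 ∧ position.2 < width then true
  else false

def input_data_to_matrix (width : Int) (height : Int) (holes : List (Int × Int)) (pieces : List (String × Int × Int)) : List (List (Option String)) :=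
  let matrix := (PySem.List.pyRange 0 height 1).map
    (fun _ => (PySem.List.pyRange 0 width 1).map (fun _ => (none : Option String)))
  let matrix := holes.foldl (fun m p =>
    if is_in_bounds width height (p.2 - 1, p.1 - 1) then
      m.modify (p.2 - 1).toNat (fun row => row.set (p.1 - 1).toNat (some "hole"))
    else m) matrix
  let matrix := pieces.foldl (fun m q =>
    if is_in_bounds width height (q.2.2 - 1, q.2.1 - 1) then
      m.modify (q.2.2 - 1).toNat (fun row => row.set (q.2.1 - 1).toNat (some q.1))
    else m) matrix
  matrix

-- ===== PORT B =====
-- B's cell helper: the reversed-pieces loop with early return, then the holes loop, then None.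
def pvCellB (holes : List (Int × Int)) (pieces : List (String × Int × Int)) (r c : Int) : Option String :=
  match pieces.reverse.find? (fun q => q.2.2 - 1 == r && q.2.1 - 1 == c) with
  | some q => some q.1
  | none =>
    match holes.find? (fun p => p.2 - 1 == r && p.1 - 1 == c) with
    | some _ => some "hole"
    | none => none

def input_data_to_matrix_alt (width : Int) (height : Int) (holes : List (Int × Int)) (pieces : List (String × Int × Int)) : List (List (Option String)) :=
  (PySem.List.pyRange 0 height 1).map
    (fun r => (PySem.List.pyRange 0 width 1).map (fun c => pvCellB holes pieces r c))

-- ===== PRECONDITION & SPEC =====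
def Spec_input_data_to_matrix (width : Int) (height : Int) (holes : List (Int × Int)) (pieces : List (String × Int × Int)) (out : List (List (Option String))) : Prop := out = input_data_to_matrix_alt width height holes pieces
instance (width : Int) (height : Int) (holes : List (Int × Int)) (pieces : List (String × Int × Int)) (out : List (List (Option String))) : Decidable (Spec_input_data_to_matrix width height holes pieces out) := by unfold Spec_input_data_to_matrix; infer_instance

-- ===== CLAIM (what is proved, stated in full; the proofs are below) =====
def Claim_equal_input_data_to_matrix : Prop := ∀ (width : Int) (height : Int) (holes : List (Int × Int)) (pieces : List (String × Int × Int)), Dom_input_data_to_matrix width height holes pieces → Spec_input_data_to_matrix width height holes pieces (input_data_to_matrix width height holes pieces)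

-- ===== LEMMAS AND PROOFS =====

-- A's generic write step: conditional in-place write of value (val x) at row (keyr x), col (keyc x).
def pvW {X : Type} (width height : Int) (keyr keyc : X → Int) (val : X → String)
    (m : List (List (Option String))) (x : X) : List (List (Option String)) :=
  if 0 ≤ keyr x ∧ keyr x < height ∧ 0 ≤ keyc x ∧ keyc x < width then
    m.modify (keyr x).toNat (fun row => row.set (keyc x).toNat (some (val x)))
  else m

-- Matrix shape: height rows, each of length width.
def pvShape (hN wN : Nat) (m : List (List (Option String))) : Prop :=
  m.length = hN ∧ ∀ i (h : i < m.length), m[i].length = wN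

-- Total cell access.
def pvAcc (m : List (List (Option String))) (r c : Nat) : Option String :=
  (m.getD r []).getD c none

lemma pvShape_W {X : Type} (width height : Int) (keyr keyc : X → Int) (val : X → String)
    (hN wN : Nat) (m : List (List (Option String))) (x : X) (hs : pvShape hN wN m) :
    pvShape hN wN (pvW width height keyr keyc val m x) := by
  obtain ⟨h1, h2⟩ := hs
  unfold pvW
  split
  · refine ⟨by simpa using h1, ?_⟩
    intro i h
    rw [List.getElem_modify]
    split
    · simpa using h2 i (by simpa using h)
    · exact h2 i (by simpa using h)
  · exact ⟨h1, h2⟩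

lemma pvShape_fold {X : Type} (width height : Int) (keyr keyc : X → Int) (val : X → String)
    (hN wN : Nat) (l : List X) :
    ∀ m, pvShape hN wN m → pvShape hN wN (l.foldl (pvW width height keyr keyc val) m) := by
  induction l with
  | nil => intro m hs; exact hs
  | cons x xs ih => intro m hs; exact ih _ (pvShape_W _ _ _ _ _ _ _ m x hs)

-- Row-level view of pvAcc over List.modify.
lemma pvAcc_modify_row (m : List (List (Option String))) (i : Nat)
    (f : List (Option String) → List (Option String)) (r c : Nat) (hr : r < m.length) :
    pvAcc (m.modify i f) r c = (if i = r then f m[r] else m[r]).getD c none := by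
  unfold pvAcc
  have h := List.getD_eq_getElem (m.modify i f) [] (n := r) (by simpa using hr)
  rw [h, List.getElem_modify]

-- Per-cell value of the fold: the last matching entry wins; bounds checks vanish because (r,c) is in bounds.
lemma pvAcc_fold {X : Type} (width height : Int) (keyr keyc : X → Int) (val : X → String)
    (r c : Int) (hr0 : 0 ≤ r) (hr1 : r < height) (hc0 : 0 ≤ c) (hc1 : c < width) (l : List X) :
    ∀ m, pvShape height.toNat width.toNat m →
      pvAcc (l.foldl (pvW width height keyr keyc val) m) r.toNat c.toNat =
        match l.reverse.find? (fun x => keyr x == r && keyc x == c) with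
        | some x => some (val x)
        | none => pvAcc m r.toNat c.toNat := by
  induction l with
  | nil => intro m _; rfl
  | cons x xs ih =>
    intro m hs
    simp only [List.foldl_cons, List.reverse_cons, List.find?_append]
    rw [ih _ (pvShape_W _ _ _ _ _ _ _ m x hs)]
    cases hfind : xs.reverse.find? (fun x => keyr x == r && keyc x == c) with
    | some y => simp
    | none =>
      obtain ⟨hlen, hrow⟩ := hs
      have hrN : r.toNat < m.length := by omega
      have hcN : c.toNat < (m[r.toNat]).length := by rw [hrow r.toNat hrN]; omega
      by_cases hpx : keyr x = r ∧ keyc x = c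
      · obtain ⟨e1, e2⟩ := hpx
        have hC : 0 ≤ keyr x ∧ keyr x < height ∧ 0 ≤ keyc x ∧ keyc x < width :=
          ⟨by omega, by omega, by omega, by omega⟩
        simp only [List.find?_cons, e1, e2, beq_self_eq_true, Bool.and_self, Option.none_or]
        simp only [pvW, if_pos hC]
        rw [e1, e2]
        rw [pvAcc_modify_row m r.toNat _ r.toNat c.toNat hrN, if_pos rfl]
        rw [List.getD_eq_getElem _ none (by simpa using hcN), List.getElem_set, if_pos rfl]
      · have hfx : (fun x => keyr x == r && keyc x == c) x = false := by
          simp only [Bool.and_eq_false_iff, beq_eq_false_iff_ne]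
          by_cases h1 : keyr x = r
          · exact Or.inr (fun h2 => hpx ⟨h1, h2⟩)
          · exact Or.inl h1
        simp only [List.find?_cons, hfx, List.find?_nil, Option.none_or]
        -- the write (if any) does not touch cell (r,c)
        unfold pvW
        split
        · rename_i hC
          obtain ⟨hk1, _, hk3, _⟩ := hC
          by_cases hrr : (keyr x).toNat = r.toNat
          · have e1 : keyr x = r := by omega
            have e2 : keyc x ≠ c := fun h2 => hpx ⟨e1, h2⟩
            rw [pvAcc_modify_row m (keyr x).toNat _ r.toNat c.toNat hrN, if_pos hrr]
            unfold pvAcc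
            rw [List.getD_eq_getElem m [] (n := r.toNat) (by simpa using hrN)]
            rw [List.getD_eq_getElem _ none (by simpa using hcN), List.getElem_set,
                if_neg (by omega)]
            rw [List.getD_eq_getElem _ none (by simpa using hcN)]
          · rw [pvAcc_modify_row m (keyr x).toNat _ r.toNat c.toNat hrN, if_neg hrr]
            unfold pvAcc
            rw [List.getD_eq_getElem m [] (n := r.toNat) (by simpa using hrN)]
        · rfl

-- pvAcc agrees with getElem on in-range indices.
lemma pvAcc_eq_getElem (m : List (List (Option String))) (r c : Nat)
    (hr : r < m.length) (hc : c < (m[r]).length) : pvAcc m r c = m[r][c] := by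
  unfold pvAcc
  rw [List.getD_eq_getElem m [] hr, List.getD_eq_getElem _ none hc]

-- A first-or-last match over holes is a match either way (the value "hole" is constant).
lemma pv_find_rev_isSome {α : Type} (p : α → Bool) (l : List α) :
    (l.reverse.find? p).isSome = (l.find? p).isSome := by
  rw [Bool.eq_iff_iff]
  simp [List.find?_isSome]

-- ===== VERDICT (by name: the statement is the Claim_ definition above) =====
theorem input_data_to_matrix_spec : Claim_equal_input_data_to_matrix := by
  intro width height holes pieces _
  show input_data_to_matrix width height holes pieces = input_data_to_matrix_alt width height holes pieces
  simp only [input_data_to_matrix, input_data_to_matrix_alt]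
  have hh : (fun (m : List (List (Option String))) (p : Int × Int) =>
        if is_in_bounds width height (p.2 - 1, p.1 - 1) then
          m.modify (p.2 - 1).toNat (fun row => row.set (p.1 - 1).toNat (some "hole")) else m)
      = pvW width height (fun p => p.2 - 1) (fun p => p.1 - 1) (fun _ => "hole") := by
    funext m p; simp [is_in_bounds, pvW]
  have hq : (fun (m : List (List (Option String))) (q : String × Int × Int) =>
        if is_in_bounds width height (q.2.2 - 1, q.2.1 - 1) then
          m.modify (q.2.2 - 1).toNat (fun row => row.set (q.2.1 - 1).toNat (some q.1)) else m)
      = pvW width height (fun q => q.2.2 - 1) (fun q => q.2.1 - 1) (fun q => q.1) := by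
    funext m q; simp [is_in_bounds, pvW]
  rw [hh, hq]
  have hs0 : pvShape height.toNat width.toNat
      ((PySem.List.pyRange 0 height 1).map
        (fun _ => (PySem.List.pyRange 0 width 1).map (fun _ => (none : Option String)))) := by
    constructor
    · simp [PySem.List.length_pyRange_one]
    · intro i h
      simp [PySem.List.length_pyRange_one]
  have hs1 := pvShape_fold width height (fun p : Int × Int => p.2 - 1) (fun p => p.1 - 1)
    (fun _ => "hole") height.toNat width.toNat holes _ hs0
  have hs2 := pvShape_fold width height (fun q : String × Int × Int => q.2.2 - 1)
    (fun q => q.2.1 - 1) (fun q => q.1) height.toNat width.toNat pieces _ hs1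
  apply List.ext_getElem
  · rw [hs2.1]; simp [PySem.List.length_pyRange_one]
  · intro i h1 h2
    have hi : i < height.toNat := by rw [hs2.1] at h1; exact h1
    have hri : ((i : Int)).toNat = i := Int.toNat_natCast i
    rw [List.getElem_map, PySem.List.getElem_pyRange_one]
    apply List.ext_getElem
    · rw [hs2.2 i h1]; simp [PySem.List.length_pyRange_one]
    · intro j g1 g2
      have hj : j < width.toNat := by rw [hs2.2 i h1] at g1; exact g1
      have hrj : ((j : Int)).toNat = j := Int.toNat_natCast j
      rw [List.getElem_map, PySem.List.getElem_pyRange_one]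
      rw [← pvAcc_eq_getElem _ i j h1 g1]
      have hcell2 := pvAcc_fold width height (fun q : String × Int × Int => q.2.2 - 1)
        (fun q => q.2.1 - 1) (fun q => q.1) (i : Int) (j : Int)
        (by omega) (by omega) (by omega) (by omega) pieces _ hs1
      have hcell1 := pvAcc_fold width height (fun p : Int × Int => p.2 - 1) (fun p => p.1 - 1)
        (fun _ => "hole") (i : Int) (j : Int)
        (by omega) (by omega) (by omega) (by omega) holes _ hs0
      rw [hri, hrj] at hcell2 hcell1
      rw [hcell2]
      have hbase : pvAcc ((PySem.List.pyRange 0 height 1).map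
          (fun _ => (PySem.List.pyRange 0 width 1).map (fun _ => (none : Option String)))) i j
          = none := by
        rw [pvAcc_eq_getElem _ i j (by simp [PySem.List.length_pyRange_one]; omega)
          (by simp [PySem.List.length_pyRange_one]; omega)]
        simp
      rw [hcell1, hbase]
      simp only [pvCellB, zero_add]
      cases pieces.reverse.find? (fun q => q.2.2 - 1 == (i : Int) && q.2.1 - 1 == (j : Int)) with
      | some q => rfl
      | none =>
        have hsame := pv_find_rev_isSome (fun p : Int × Int => p.2 - 1 == (i : Int) && p.1 - 1 == (j : Int)) holes
        cases h1' : holes.reverse.find? (fun p => p.2 - 1 == (i : Int) && p.1 - 1 == (j : Int)) with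
        | some p =>
          cases h2' : holes.find? (fun p => p.2 - 1 == (i : Int) && p.1 - 1 == (j : Int)) with
          | some p' => rfl
          | none => rw [h1', h2'] at hsame; simp at hsame
        | none =>
          cases h2' : holes.find? (fun p => p.2 - 1 == (i : Int) && p.1 - 1 == (j : Int)) with
          | some p' => rw [h1', h2'] at hsame; simp at hsame
          | none => rfl
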